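-- pv_equiv track=rewrite | github.com/Damnun/Tour_Of_Baekjoon | 1000/Baekjoon_No1062.py | go
-- ===== SOURCE A (Python) =====
-- def count(mask, words):
--     cnt = 0
--     for word in words:
--         if (word & ((1 << 26) - 1 - mask)) == 0:
--             cnt += 1
--     return cnt
--
-- def go(index, k, mask, words):
--     if k < 0:  # k 개의 단어를 모두 고르면 끝
--         return 0
--     if index == 26:  # 성공적으로 26개의 알파벳 순회가 끝나면 끝
--         return count(mask, words)
--     ans = 0
--     t1 = go(index + 1, k - 1, mask | (1 << index), words)
--     if ans < t1:  # ans < t1일 경우 t1을 ans로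
--         ans = t1
--     if index not in [ord('a') - ord('a'), ord('n') - ord('a'), ord('t') - ord('a'), ord('i') - ord('a'), ord('c') - ord('a')]:
--         t2 = go(index + 1, k, mask, words)
--         if ans < t2:  # ans < t2일 경우 t2를 ans로
--             ans = t2
--     return ans
-- ===== SOURCE B (Python) =====
-- def go(index, k, mask, words):
--     F = (0, 13, 19, 8, 2)  # letters a, n, t, i, c that every word needs
--     full = (1 << 26) - 1
--     need = 0
--     base = mask
--     for i in F:
--         if i >= index:
--             need += 1
--             base |= 1 << i
--     if k < need:
--         return 0
--     opt = [i for i in range(index, 26) if i not in F]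
--     limit = k - need
--     cands = [(base, 0)]
--     for i in opt:
--         b = 1 << i
--         cands += [(m | b, c + 1) for (m, c) in cands if c < limit]
--     best = 0
--     for (m, c) in cands:
--         rem = full - m
--         n = 0
--         for w in words:
--             if w & rem == 0:
--                 n += 1
--         if best < n:
--             best = n
--     return best
-- ===== Notes on version B (the rewrite author's own statement) =====
-- stated objective: alternative
-- what changed: A's recursive take/skip DFS over the 26 letters is replaced by a non-recursive combinatorial scan: B precomputes the forced letters a,n,t,i,c and the optional letters >= index, returns 0 when the budget cannot cover the forced letters, and otherwise maximises the word count over all bitmask-encoded subsets of the optional letters whose popcount fits the remaining budget.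
import Mathlib
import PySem

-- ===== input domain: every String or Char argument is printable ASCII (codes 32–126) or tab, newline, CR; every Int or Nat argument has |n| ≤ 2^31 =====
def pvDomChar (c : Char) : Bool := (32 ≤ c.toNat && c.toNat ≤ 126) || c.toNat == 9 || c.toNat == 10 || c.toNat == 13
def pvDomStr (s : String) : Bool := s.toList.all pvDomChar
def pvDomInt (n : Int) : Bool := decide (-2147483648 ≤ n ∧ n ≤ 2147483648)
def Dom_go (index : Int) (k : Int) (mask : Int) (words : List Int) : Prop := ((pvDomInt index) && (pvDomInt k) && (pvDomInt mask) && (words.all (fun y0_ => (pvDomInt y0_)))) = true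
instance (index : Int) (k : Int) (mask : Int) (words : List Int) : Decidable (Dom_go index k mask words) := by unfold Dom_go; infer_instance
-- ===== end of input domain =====

-- B replaces A's recursive DFS over the 26 letters by a direct combinatorial scan: it precomputes the
-- forced letters a,n,t,i,c and the optional letters ≥ index, and takes the best word count over all
-- bitmask-encoded subsets of the optional letters within the remaining budget (objective: alternative).

-- ===== PORT A =====
def countA (mask : Int) (words : List Int) : Int :=
  words.foldl (fun cnt word =>
    if PySem.Int.band word ((1 <<< (26:Nat)) - 1 - mask) = 0 then cnt + 1 else cnt) 0

-- fuel-based transcription of A's recursion; fuel (27 - index).toNat bounds the depth index → 26,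
-- exact on Pre_go (index ≤ 26, or k < 0 where A returns before recursing).
-- `1 << index` is ported as `1 <<< index.toNat`: inside Pre_go the shift amount is never negative.
def goF : Nat → Int → Int → Int → List Int → Int
  | 0, _, _, _, _ => 0
  | fuel + 1, index, k, mask, words =>
    if k < 0 then 0
    else if index = 26 then countA mask words
    else
      let t1 := goF fuel (index + 1) (k - 1) (PySem.Int.bor mask ((1:Int) <<< index.toNat)) words
      let ans := if 0 < t1 then t1 else 0
      if index ∉ ([0, 13, 19, 8, 2] : List Int) then
        let t2 := goF fuel (index + 1) k mask words
        if ans < t2 then t2 else ans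
      else ans

def go (index : Int) (k : Int) (mask : Int) (words : List Int) : Int :=
  goF (27 - index).toNat index k mask words

-- ===== PORT B =====
def go_alt (index : Int) (k : Int) (mask : Int) (words : List Int) : Int :=
  let F : List Int := [0, 13, 19, 8, 2]
  let full : Int := (1 <<< (26:Nat)) - 1
  let nb := F.foldl (fun (p : Int × Int) i =>
      if index ≤ i then (p.1 + 1, PySem.Int.bor p.2 ((1:Int) <<< i.toNat)) else p) (0, mask)
  if k < nb.1 then 0
  else
    let opt := (PySem.List.pyRange index 26 1).filter (fun i => !F.contains i)
    let limit := k - nb.1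
    let cands := opt.foldl (fun (cands : List (Int × Int)) i =>
        let b := (1:Int) <<< i.toNat
        cands ++ (cands.filter (fun p => p.2 < limit)).map (fun p => (PySem.Int.bor p.1 b, p.2 + 1)))
      [(nb.2, 0)]
    cands.foldl (fun best p =>
      let rem := full - p.1
      let n := words.foldl (fun n w => if PySem.Int.band w rem = 0 then n + 1 else n) 0
      if best < n then n else best) 0

-- ===== PRECONDITION & SPEC =====
-- Pre_go: exactly the inputs on which the Python A returns: for index outside 0..26 with k ≥ 0
-- A raises (ValueError from `1 << index` for negative index, RecursionError for index > 26);
-- with k < 0 it returns 0 at once for any index.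
def Pre_go (index : Int) (k : Int) (mask : Int) (words : List Int) : Prop :=
  (0 ≤ index ∧ index ≤ 26) ∨ k < 0
instance (index : Int) (k : Int) (mask : Int) (words : List Int) : Decidable (Pre_go index k mask words) := by
  unfold Pre_go; infer_instance

def pvWitness_go : Int × Int × Int × List Int := (22, 5, 0, [3, 4194304])

def Spec_go (index : Int) (k : Int) (mask : Int) (words : List Int) (out : Int) : Prop := out = go_alt index k mask words
instance (index : Int) (k : Int) (mask : Int) (words : List Int) (out : Int) : Decidable (Spec_go index k mask words out) := by unfold Spec_go; infer_instance

-- ===== CLAIM (what is proved, stated in full; the proofs are below) =====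
def Claim_equal_go : Prop := ∀ (index : Int) (k : Int) (mask : Int) (words : List Int), Dom_go index k mask words → Pre_go index k mask words → Spec_go index k mask words (go index k mask words)

-- ===== LEMMAS AND PROOFS =====

-- ---- proof-side vocabulary ----
def FLs : List Int := [0, 13, 19, 8, 2]

def bitI (i : Int) : Int := (2:Int) ^ i.toNat

def orBits (m : Int) (P : List Int) : Int := P.foldl (fun a i => PySem.Int.bor a (bitI i)) m

def bestC (words : List Int) (ms : List Int) : Int :=
  ms.foldl (fun b m => if b < countA m words then countA m words else b) 0

def idxsOf (j : Nat) : List Int := List.map (fun n : Nat => (n : Int)) (List.range' j (26 - j))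

-- structural mirror of A's recursion on the explicit list of remaining letter indices
def goL : List Int → Int → Int → List Int → Int
  | [], k, mask, words => if k < 0 then 0 else countA mask words
  | i :: rest, k, mask, words =>
    if k < 0 then 0
    else
      let t1 := goL rest (k - 1) (PySem.Int.bor mask (bitI i)) words
      let ans := if 0 < t1 then t1 else 0
      if i ∉ FLs then
        let t2 := goL rest k mask words
        if ans < t2 then t2 else ans
      else ans

-- the pick-lists of the surviving branches of A's search tree
def paths : List Int → Int → List (List Int)
  | [], _ => [[]]
  | i :: rest, k =>
      (if 1 ≤ k then (paths rest (k - 1)).map (i :: ·) else []) ++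
      (if i ∈ FLs then [] else paths rest k)

-- B's inner scan, named (shifts written as the equal powers of two; see shift_nat_pow / shift_int_pow)
def Bcore (words : List Int) (base : Int) (opt : List Int) (limit : Int) : Int :=
  (opt.foldl (fun (cands : List (Int × Int)) i =>
      let b := (2:Int) ^ i.toNat
      cands ++ (cands.filter (fun p => p.2 < limit)).map (fun p => (PySem.Int.bor p.1 b, p.2 + 1)))
    [(base, 0)]).foldl (fun best p =>
      let rem := ((1 <<< 26 : Nat) : Int) - 1 - p.1
      let n := words.foldl (fun n w => if PySem.Int.band w rem = 0 then n + 1 else n) 0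
      if best < n then n else best) 0

-- ---- bit lemmas ----
theorem sub_and_eq_xor_and (A : Nat) : ∀ x : Nat, A - (A &&& x) = A ^^^ (A &&& x) := by
  induction A using Nat.binaryRec with
  | zero => intro x; simp
  | bit b n ih =>
    intro x
    induction x using Nat.bitCasesOn with
    | _ c m =>
      rw [Nat.land_bit, Nat.xor_bit, Nat.bit_val, Nat.bit_val, Nat.bit_val]
      have h1 : n &&& m ≤ n := Nat.and_le_left
      have h3 : n - (n &&& m) = n ^^^ (n &&& m) := ih m
      cases b <;> cases c <;> simp <;> omega

theorem gsub_swap (A x y : Nat) :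
    (A - (A &&& x)) - ((A - (A &&& x)) &&& y) = (A - (A &&& y)) - ((A - (A &&& y)) &&& x) := by
  rw [sub_and_eq_xor_and, sub_and_eq_xor_and, sub_and_eq_xor_and, sub_and_eq_xor_and]
  apply Nat.eq_of_testBit_eq
  intro i
  simp only [Nat.testBit_xor, Nat.testBit_and]
  generalize A.testBit i = a
  generalize x.testBit i = u
  generalize y.testBit i = v
  cases a <;> cases u <;> cases v <;> decide

theorem bor_neg_nonneg {a b : Int} (ha : a < 0) (hb : 0 ≤ b) :
    PySem.Int.bor a b = -(((-a - 1).toNat - ((-a - 1).toNat &&& b.toNat) : Nat)) - 1 := by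
  simp only [PySem.Int.bor, if_neg (by omega : ¬ 0 ≤ a), if_pos hb]

theorem bor_swap (a x y : Int) (hx : 0 ≤ x) (hy : 0 ≤ y) :
    PySem.Int.bor (PySem.Int.bor a x) y = PySem.Int.bor (PySem.Int.bor a y) x := by
  by_cases ha : 0 ≤ a
  · rw [PySem.Int.bor_of_nonneg ha hx, PySem.Int.bor_of_nonneg ha hy,
        PySem.Int.bor_of_nonneg (by positivity) hy, PySem.Int.bor_of_nonneg (by positivity) hx]
    simp only [Int.toNat_natCast]
    rw [Nat.lor_assoc, Nat.lor_assoc, Nat.lor_comm x.toNat y.toNat]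
  · have ha' : a < 0 := by omega
    rw [bor_neg_nonneg ha' hx, bor_neg_nonneg ha' hy]
    have hax : (-(((-a - 1).toNat - ((-a - 1).toNat &&& x.toNat) : Nat)) - 1 : Int) < 0 := by omega
    have hay : (-(((-a - 1).toNat - ((-a - 1).toNat &&& y.toNat) : Nat)) - 1 : Int) < 0 := by omega
    rw [bor_neg_nonneg hax hy, bor_neg_nonneg hay hx]
    have e1 : (-(-(((-a - 1).toNat - ((-a - 1).toNat &&& x.toNat) : Nat)) - 1) - 1 : Int).toNat
        = (-a - 1).toNat - ((-a - 1).toNat &&& x.toNat) := by omega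
    have e2 : (-(-(((-a - 1).toNat - ((-a - 1).toNat &&& y.toNat) : Nat)) - 1) - 1 : Int).toNat
        = (-a - 1).toNat - ((-a - 1).toNat &&& y.toNat) := by omega
    rw [e1, e2, gsub_swap]

theorem bitI_nonneg (i : Int) : 0 ≤ bitI i := by
  unfold bitI; positivity

-- every `1 << …` of the ports, whichever shift instance it elaborated to, rewrites to a power of two
theorem shift_nat_pow (n : Nat) : ((1:Int) <<< n) = (2:Int) ^ n := by
  rw [Int.shiftLeft_eq, one_mul]

theorem shift_int_pow (n : Nat) : ((1:Int) <<< (n : Int)) = (2:Int) ^ n := by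
  rw [Int.one_shiftLeft]; push_cast; ring

theorem orBits_cons (m i : Int) (P : List Int) :
    orBits m (i :: P) = orBits (PySem.Int.bor m ((2:Int) ^ i.toNat)) P := by
  simp [orBits, bitI]

theorem orBits_perm (m : Int) {P Q : List Int} (h : P.Perm Q) : orBits m P = orBits m Q := by
  exact h.foldl_eq' (fun x _ y _ z => bor_swap z (bitI x) (bitI y) (bitI_nonneg x) (bitI_nonneg y)) m

theorem orBits_append (m : Int) (P Q : List Int) : orBits m (P ++ Q) = orBits (orBits m P) Q := by
  unfold orBits; exact List.foldl_append

-- ---- bestC lemmas ----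
theorem countA_nonneg (m : Int) (words : List Int) : 0 ≤ countA m words := by
  unfold countA
  have : ∀ (ws : List Int) (c : Int), c ≤ ws.foldl (fun cnt word =>
      if PySem.Int.band word ((1 <<< (26:Nat)) - 1 - m) = 0 then cnt + 1 else cnt) c := by
    intro ws
    induction ws with
    | nil => intro c; simp
    | cons w ws ih =>
      intro c
      simp only [List.foldl_cons]
      split
      · exact le_trans (by omega) (ih (c + 1))
      · exact ih c
  exact this words 0

theorem bestC_step (words : List Int) :
    (fun (b m : Int) => if b < countA m words then countA m words else b) =
      fun (b m : Int) => max b (countA m words) := by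
  funext b m; split <;> omega

theorem bestC_eq (words ms : List Int) :
    bestC words ms = ms.foldl (fun b m => max b (countA m words)) 0 := by
  unfold bestC; rw [bestC_step]

theorem bestC_nil (words : List Int) : bestC words [] = 0 := rfl

theorem bestC_init (words : List Int) :
    ∀ (ms : List Int) (b : Int), 0 ≤ b →
      ms.foldl (fun b m => max b (countA m words)) b =
        max b (ms.foldl (fun b m => max b (countA m words)) 0) := by
  intro ms
  induction ms with
  | nil =>
    intro b hb
    simp only [List.foldl_nil]
    omega
  | cons m ms ih =>
    intro b hb
    simp only [List.foldl_cons]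
    rw [ih (max b (countA m words)) (by have := countA_nonneg m words; omega),
        ih (max 0 (countA m words)) (by have := countA_nonneg m words; omega)]
    have := countA_nonneg m words
    omega

theorem bestC_nonneg (words ms : List Int) : 0 ≤ bestC words ms := by
  have h := bestC_init words ms 0 le_rfl
  rw [bestC_eq]
  omega

theorem bestC_append (words xs ys : List Int) :
    bestC words (xs ++ ys) = max (bestC words xs) (bestC words ys) := by
  have h1 := bestC_nonneg words xs
  have h2 := bestC_init words ys (bestC words xs) h1
  rw [bestC_eq words (xs ++ ys), List.foldl_append, ← bestC_eq words xs, bestC_eq words ys]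
  exact h2

theorem le_bestC (words : List Int) {ms : List Int} {m : Int} (h : m ∈ ms) :
    countA m words ≤ bestC words ms := by
  induction ms with
  | nil => cases h
  | cons x ms ih =>
    have hx := countA_nonneg x words
    have hstep : bestC words (x :: ms) = max (max 0 (countA x words)) (bestC words ms) := by
      rw [bestC_eq, List.foldl_cons, bestC_eq]
      exact bestC_init words ms (max 0 (countA x words)) (by omega)
    rcases List.mem_cons.1 h with rfl | hm
    · rw [hstep]; omega
    · have := ih hm; rw [hstep]; omega

theorem bestC_le (words : List Int) {ms : List Int} {c : Int} (h0 : 0 ≤ c)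
    (h : ∀ m ∈ ms, countA m words ≤ c) : bestC words ms ≤ c := by
  induction ms with
  | nil => simpa [bestC] using h0
  | cons x ms ih =>
    have hstep : bestC words (x :: ms) = max (max 0 (countA x words)) (bestC words ms) := by
      rw [bestC_eq, List.foldl_cons, bestC_eq]
      exact bestC_init words ms (max 0 (countA x words)) (by have := countA_nonneg x words; omega)
    rw [hstep]
    have hx := h x (by simp)
    have hrest := ih (fun m hm => h m (by simp [hm]))
    omega

theorem bestC_ext (words : List Int) {ms₁ ms₂ : List Int}
    (h : ∀ m, m ∈ ms₁ ↔ m ∈ ms₂) : bestC words ms₁ = bestC words ms₂ := by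
  apply le_antisymm
  · exact bestC_le words (bestC_nonneg words ms₂) (fun m hm => le_bestC words ((h m).1 hm))
  · exact bestC_le words (bestC_nonneg words ms₁) (fun m hm => le_bestC words ((h m).2 hm))

-- ---- A-side characterization ----
theorem goF_neg (fuel : Nat) (index k mask : Int) (words : List Int) (hk : k < 0) :
    goF fuel index k mask words = 0 := by
  cases fuel <;> simp [goF, hk]

theorem goF_eq_goL (words : List Int) :
    ∀ (fuel j : Nat), j ≤ 26 → 27 - j ≤ fuel → ∀ k mask,
      goF fuel (j : Int) k mask words = goL (idxsOf j) k mask words := by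
  intro fuel
  induction fuel with
  | zero => intro j h1 h2; omega
  | succ fuel ih =>
    intro j h1 h2 k mask
    by_cases hj : j = 26
    · subst hj
      have : idxsOf 26 = [] := by rfl
      rw [this]
      simp [goF, goL]
    · have hj26 : j < 26 := by omega
      have hcons : idxsOf j = (j : Int) :: idxsOf (j + 1) := by
        unfold idxsOf
        have : 26 - j = (26 - (j + 1)) + 1 := by omega
        rw [this, List.range'_succ]
        simp
      rw [hcons]
      show goF (fuel + 1) (j : Int) k mask words = goL ((j : Int) :: idxsOf (j + 1)) k mask words
      unfold goF goL
      have hne : ((j : Int) = 26) = False := by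
        simp only [eq_iff_iff, iff_false]
        intro hc
        omega
      have hrec1 : goF fuel ((j : Int) + 1) (k - 1) (PySem.Int.bor mask ((1:Int) <<< (j : Int).toNat)) words
          = goL (idxsOf (j + 1)) (k - 1) (PySem.Int.bor mask (bitI (j : Int))) words := by
        have hc : ((j : Int) + 1) = ((j + 1 : Nat) : Int) := by push_cast; ring
        rw [hc, ih (j + 1) (by omega) (by omega)]
        simp only [shift_nat_pow, shift_int_pow, bitI]
      have hrec2 : goF fuel ((j : Int) + 1) k mask words = goL (idxsOf (j + 1)) k mask words := by
        have : ((j : Int) + 1) = ((j + 1 : Nat) : Int) := by push_cast; ring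
        rw [this, ih (j + 1) (by omega) (by omega)]
      simp only [hne, if_false, FLs]
      rw [hrec1, hrec2]

theorem goL_eq_bestC (words : List Int) :
    ∀ (idxs : List Int) (k mask : Int),
      goL idxs k mask words =
        if k < 0 then 0 else bestC words ((paths idxs k).map (orBits mask)) := by
  intro idxs
  induction idxs with
  | nil =>
    intro k mask
    unfold goL paths
    by_cases hk : k < 0
    · simp [hk]
    · simp only [if_neg hk, List.map_cons, List.map_nil]
      have h := countA_nonneg mask words
      rw [bestC_eq]
      simp only [List.foldl_cons, List.foldl_nil]
      have : orBits mask [] = mask := rfl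
      rw [this]
      omega
  | cons i rest ih =>
    intro k mask
    by_cases hk : k < 0
    · unfold goL; simp [hk]
    · simp only [goL, paths, if_neg hk]
      rw [ih, ih, if_neg hk]
      have epick : (if 1 ≤ k then (paths rest (k - 1)).map (i :: ·) else []).map (orBits mask) =
          if 1 ≤ k then (paths rest (k - 1)).map (orBits (PySem.Int.bor mask (bitI i))) else [] := by
        by_cases h1 : 1 ≤ k
        · rw [if_pos h1, if_pos h1, List.map_map]
          exact List.map_congr_left (fun Q _ => orBits_cons mask i Q)
        · rw [if_neg h1, if_neg h1, List.map_nil]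
      rw [List.map_append, bestC_append, epick]
      have eskip : (if i ∈ FLs then ([] : List (List Int)) else paths rest k).map (orBits mask) =
          if i ∈ FLs then [] else (paths rest k).map (orBits mask) := by
        by_cases hf : i ∈ FLs <;> simp [hf]
      rw [eskip, apply_ite (bestC words), apply_ite (bestC words), bestC_nil]
      have hA1 := bestC_nonneg words ((paths rest (k - 1)).map (orBits (PySem.Int.bor mask (bitI i))))
      have hA2 := bestC_nonneg words ((paths rest k).map (orBits mask))
      by_cases hf : i ∈ FLs
      · rw [if_neg (not_not_intro hf), if_pos hf]
        by_cases h1 : 1 ≤ k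
        · rw [if_pos h1, if_neg (show ¬ k - 1 < 0 by omega)]
          split_ifs <;> omega
        · rw [if_neg h1, if_pos (show k - 1 < 0 by omega)]
          split_ifs <;> omega
      · rw [if_pos hf, if_neg hf]
        by_cases h1 : 1 ≤ k
        · rw [if_pos h1, if_neg (show ¬ k - 1 < 0 by omega)]
          split_ifs <;> omega
        · rw [if_neg h1, if_pos (show k - 1 < 0 by omega)]
          split_ifs <;> omega

theorem paths_mem {idxs : List Int} (hnd : idxs.Nodup) :
    ∀ (k : Int), 0 ≤ k → ∀ (P : List Int),
      P ∈ paths idxs k ↔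
        (P.Sublist idxs ∧ (∀ x ∈ idxs, x ∈ FLs → x ∈ P) ∧ (P.length : Int) ≤ k) := by
  induction idxs with
  | nil =>
    intro k hk P
    unfold paths
    simp only [List.mem_singleton, List.sublist_nil]
    constructor
    · rintro rfl
      exact ⟨rfl, by simp, by simpa using hk⟩
    · rintro ⟨rfl, -, -⟩; rfl
  | cons i rest ih =>
    intro k hk P
    have hi : i ∉ rest := (List.nodup_cons.1 hnd).1
    have hndr : rest.Nodup := (List.nodup_cons.1 hnd).2
    unfold paths
    rw [List.mem_append]
    constructor
    · rintro (hpick | hskip)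
      · by_cases h1 : 1 ≤ k
        · rw [if_pos h1] at hpick
          rcases List.mem_map.1 hpick with ⟨Q, hQ, rfl⟩
          rcases (ih hndr (k - 1) (by omega) Q).1 hQ with ⟨hs, hfq, hl⟩
          refine ⟨hs.cons₂ i, ?_, ?_⟩
          · intro x hx hxF
            rcases List.mem_cons.1 hx with rfl | hx'
            · exact List.mem_cons_self
            · exact List.mem_cons_of_mem _ (hfq x hx' hxF)
          · simp only [List.length_cons]
            push_cast
            omega
        · rw [if_neg h1] at hpick
          cases hpick
      · by_cases hf : i ∈ FLs
        · rw [if_pos hf] at hskip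
          cases hskip
        · rw [if_neg hf] at hskip
          rcases (ih hndr k hk P).1 hskip with ⟨hs, hfq, hl⟩
          refine ⟨hs.cons i, ?_, hl⟩
          intro x hx hxF
          rcases List.mem_cons.1 hx with rfl | hx'
          · exact absurd hxF hf
          · exact hfq x hx' hxF
    · rintro ⟨hs, hfq, hl⟩
      rcases List.sublist_cons_iff.1 hs with hPr | ⟨Q, rfl, hQr⟩
      · right
        have hiF : i ∉ FLs := by
          intro hiF
          exact hi (hPr.subset (hfq i List.mem_cons_self hiF))
        rw [if_neg hiF]
        exact (ih hndr k hk P).2 ⟨hPr, fun x hx hxF => hfq x (List.mem_cons_of_mem _ hx) hxF, hl⟩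
      · left
        have h1 : 1 ≤ k := by
          simp only [List.length_cons] at hl
          push_cast at hl
          omega
        rw [if_pos h1]
        apply List.mem_map.2
        refine ⟨Q, (ih hndr (k - 1) (by omega) Q).2 ⟨hQr, ?_, ?_⟩, rfl⟩
        · intro x hx hxF
          rcases List.mem_cons.1 (hfq x (List.mem_cons_of_mem _ hx) hxF) with rfl | hxQ
          · exact absurd hx hi
          · exact hxQ
        · simp only [List.length_cons] at hl
          push_cast at hl ⊢
          omega

-- ---- B-side characterization ----
theorem mem_dbl (limit : Int) :
    ∀ (opt : List Int) (cands : List (Int × Int)) (p : Int × Int),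
      p ∈ opt.foldl (fun (cands : List (Int × Int)) i =>
          let b := (2:Int) ^ i.toNat
          cands ++ (cands.filter (fun p => p.2 < limit)).map (fun p => (PySem.Int.bor p.1 b, p.2 + 1)))
        cands ↔
      ∃ q ∈ cands, ∃ S : List Int, S.Sublist opt ∧ (q.2 + (S.length : Int) ≤ limit ∨ S = []) ∧
        p = (orBits q.1 S, q.2 + (S.length : Int)) := by
  intro opt
  induction opt with
  | nil =>
    intro cands p
    simp only [List.foldl_nil, List.sublist_nil]
    constructor
    · intro hp
      exact ⟨p, hp, [], by simp [orBits]⟩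
    · rintro ⟨q, hq, S, rfl, -, rfl⟩
      simpa [orBits] using hq
  | cons i rest ih =>
    intro cands p
    simp only [List.foldl_cons]
    rw [ih]
    constructor
    · rintro ⟨q', hq', S', hS', hcond', rfl⟩
      rcases List.mem_append.1 hq' with hq | hq
      · exact ⟨q', hq, S', hS'.cons i, hcond', rfl⟩
      · rcases List.mem_map.1 hq with ⟨q, hqf, rfl⟩
        rcases List.mem_filter.1 hqf with ⟨hq2, hlt⟩
        rw [decide_eq_true_eq] at hlt
        refine ⟨q, hq2, i :: S', hS'.cons₂ i, ?_, ?_⟩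
        · left
          simp only [List.length_cons]
          push_cast
          rcases hcond' with h | rfl
          · simp only at h
            push_cast at h
            omega
          · simp only [List.length_nil]
            omega
        · simp only [orBits_cons, List.length_cons, Prod.mk.injEq]
          push_cast
          constructor <;> first | trivial | omega
    · rintro ⟨q, hq, S, hS, hcond, rfl⟩
      rcases List.sublist_cons_iff.1 hS with hSr | ⟨S', rfl, hS'r⟩
      · exact ⟨q, List.mem_append_left _ hq, S, hSr, hcond, rfl⟩
      · have hlt : q.2 < limit := by
          rcases hcond with h | habs
          · simp only [List.length_cons] at h
            push_cast at h
            omega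
          · cases habs
        refine ⟨(PySem.Int.bor q.1 ((2:Int) ^ i.toNat), q.2 + 1),
          List.mem_append_right _ (List.mem_map.2 ⟨q, List.mem_filter.2 ⟨hq, by
            rw [decide_eq_true_eq]; exact hlt⟩, rfl⟩), S', hS'r, ?_, ?_⟩
        · rcases hcond with h | habs
          · left
            simp only [List.length_cons] at h
            push_cast at h ⊢
            omega
          · cases habs
        · simp only [orBits_cons, List.length_cons, Prod.mk.injEq]
          push_cast
          constructor <;> first | trivial | omega

theorem filter_mem_sub {S opt : List Int} (h : S.Sublist opt) (hnd : opt.Nodup) :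
    opt.filter (fun x => S.contains x) = S := by
  induction h with
  | slnil => rfl
  | @cons l₁ l₂ a hsub ih =>
    have ha : a ∉ l₂ := (List.nodup_cons.1 hnd).1
    have haS : (l₁.contains a) = false := by
      rw [List.contains_eq_mem]
      simp only [decide_eq_false_iff_not]
      intro hmem
      exact ha (hsub.subset hmem)
    simp only [List.filter_cons, haS]
    exact ih (List.nodup_cons.1 hnd).2
  | @cons₂ l₁ l₂ a hsub ih =>
    have ha : a ∉ l₂ := (List.nodup_cons.1 hnd).1
    simp only [List.filter_cons, List.contains_eq_mem, List.mem_cons, true_or, decide_true, if_pos]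
    congr 1
    rw [List.filter_congr (fun x hx => ?_), ih (List.nodup_cons.1 hnd).2]
    have hxa : x ≠ a := fun hcontra => ha (hcontra ▸ hx)
    simp [List.contains_eq_mem, hxa]

theorem fold_best (words : List Int) :
    ∀ (L : List (Int × Int)) (b : Int),
      L.foldl (fun best p => if best < countA p.1 words then countA p.1 words else best) b =
        (L.map Prod.fst).foldl (fun best m => if best < countA m words then countA m words else best) b := by
  intro L
  induction L with
  | nil => intro b; rfl
  | cons p L ih =>
    intro b
    simp only [List.foldl_cons, List.map_cons]
    exact ih _

theorem Bcore_eq_bestC (words : List Int) (base : Int) (opt : List Int) (limit : Int) :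
    Bcore words base opt limit =
      bestC words
        ((opt.foldl (fun (cands : List (Int × Int)) i =>
            let b := (2:Int) ^ i.toNat
            cands ++ (cands.filter (fun p => p.2 < limit)).map (fun p => (PySem.Int.bor p.1 b, p.2 + 1)))
          [(base, 0)]).map Prod.fst) := by
  unfold Bcore
  rw [show (fun (best : Int) (p : Int × Int) =>
      let rem := ((1 <<< 26 : Nat) : Int) - 1 - p.1
      let n := words.foldl (fun n w => if PySem.Int.band w rem = 0 then n + 1 else n) 0
      if best < n then n else best) =
      (fun (best : Int) (p : Int × Int) =>
        if best < countA p.1 words then countA p.1 words else best) from rfl]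
  rw [fold_best]
  rfl

-- ---- the core equivalence ----
theorem core (words : List Int) (idxs : List Int) (k mask : Int) (hnd : idxs.Nodup) (hk : 0 ≤ k) :
    bestC words ((paths idxs k).map (orBits mask)) =
      (if k < ((idxs.filter (fun i => FLs.contains i)).length : Int) then 0
       else Bcore words (orBits mask (idxs.filter (fun i => FLs.contains i)))
              (idxs.filter (fun i => !FLs.contains i))
              (k - ((idxs.filter (fun i => FLs.contains i)).length : Int))) := by
  set forcedL := idxs.filter (fun i => FLs.contains i) with hforced
  set opt := idxs.filter (fun i => !FLs.contains i) with hopt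
  have hoptnd : opt.Nodup := hnd.filter _
  have hforcednd : forcedL.Nodup := hnd.filter _
  have hsplit : ∀ P : List Int, P.Sublist idxs → (∀ x ∈ idxs, x ∈ FLs → x ∈ P) →
      P.filter (fun i => FLs.contains i) = forcedL := by
    intro P hs hf
    have h1 : (P.filter (fun i => FLs.contains i)).Sublist forcedL := hs.filter _
    have h2 : forcedL ⊆ P.filter (fun i => FLs.contains i) := by
      intro x hx
      rw [hforced, List.mem_filter] at hx
      rcases hx with ⟨hxi, hxF⟩
      rw [List.mem_filter]
      exact ⟨hf x hxi (by simpa [List.contains_eq_mem] using hxF), hxF⟩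
    exact h1.eq_of_length (le_antisymm h1.length_le (hforcednd.subperm h2).length_le)
  by_cases hklt : k < (forcedL.length : Int)
  · rw [if_pos hklt]
    have hempty : ∀ P, P ∉ paths idxs k := by
      intro P hP
      rcases (paths_mem hnd k hk P).1 hP with ⟨hs, hf, hl⟩
      have hPf := hsplit P hs hf
      have hlen : forcedL.length ≤ P.length := by
        rw [← hPf]
        exact (List.length_filter_le _ P)
      omega
    have : paths idxs k = [] := List.eq_nil_iff_forall_not_mem.2 hempty
    rw [this]
    rfl
  · rw [if_neg hklt]
    rw [Bcore_eq_bestC]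
    apply bestC_ext
    intro m
    rw [List.mem_map, List.mem_map]
    constructor
    · rintro ⟨P, hP, rfl⟩
      rcases (paths_mem hnd k hk P).1 hP with ⟨hs, hf, hl⟩
      have hPf := hsplit P hs hf
      set S := P.filter (fun i => !FLs.contains i) with hS
      have hSsub : S.Sublist opt := hs.filter _
      have hPperm : (forcedL ++ S).Perm P := by
        have h := List.filter_append_perm (fun i => FLs.contains i) P
        rwa [hPf] at h
      have hPlen : P.length = forcedL.length + S.length := by
        rw [← hPperm.length_eq, List.length_append]
      refine ⟨(orBits (orBits mask forcedL) S, 0 + (S.length : Int)), ?_, ?_⟩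
      · rw [mem_dbl]
        exact ⟨(orBits mask forcedL, 0), List.mem_singleton.2 rfl, S, hSsub,
          Or.inl (by push_cast; omega), rfl⟩
      · show orBits (orBits mask forcedL) S = orBits mask P
        calc orBits (orBits mask forcedL) S
            = orBits mask (forcedL ++ S) := (orBits_append mask forcedL S).symm
          _ = orBits mask P := orBits_perm mask hPperm
    · rintro ⟨q', hq', rfl⟩
      rw [mem_dbl] at hq'
      rcases hq' with ⟨q, hq, S, hSsub, hcond, rfl⟩
      rcases List.mem_singleton.1 hq with rfl
      have hSlen : ((S.length : Int)) ≤ k - (forcedL.length : Int) := by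
        rcases hcond with h | rfl
        · simpa using h
        · simp only [List.length_nil]
          push_cast
          omega
      set P := idxs.filter (fun x => FLs.contains x || S.contains x) with hP
      have hPs : P.Sublist idxs := List.filter_sublist
      have hPforced : ∀ x ∈ idxs, x ∈ FLs → x ∈ P := by
        intro x hx hxF
        rw [hP, List.mem_filter]
        exact ⟨hx, by simp [List.contains_eq_mem, hxF]⟩
      have hPtrue : P.filter (fun i => FLs.contains i) = forcedL := by
        rw [hP, List.filter_filter, hforced]
        apply List.filter_congr
        intro x hx
        cases hc : FLs.contains x <;> simp [hc]
      have hPfalse : P.filter (fun i => !FLs.contains i) = S := by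
        rw [hP, List.filter_filter]
        have : ∀ x ∈ idxs, ((!FLs.contains x) && (FLs.contains x || S.contains x)) =
            (S.contains x && !FLs.contains x) := by
          intro x hx
          cases hc : FLs.contains x <;> cases hcs : S.contains x <;> simp [hc, hcs]
        rw [List.filter_congr this, ← List.filter_filter, ← hopt]
        exact filter_mem_sub hSsub hoptnd
      have hPlen : P.length = forcedL.length + S.length := by
        have hperm := List.filter_append_perm (fun i => FLs.contains i) P
        rw [hPtrue] at hperm
        have : P.filter (fun i => !FLs.contains i) = S := hPfalse
        rw [this] at hperm
        rw [← hperm.length_eq, List.length_append]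
      refine ⟨P, (paths_mem hnd k hk P).2 ⟨hPs, hPforced, by push_cast; omega⟩, ?_⟩
      have hperm := List.filter_append_perm (fun i => FLs.contains i) P
      rw [hPtrue, hPfalse] at hperm
      show orBits mask P = (orBits (orBits mask forcedL) S, (0:Int) + (S.length : Int)).1
      calc orBits mask P = orBits mask (forcedL ++ S) := (orBits_perm mask hperm).symm
        _ = orBits (orBits mask forcedL) S := orBits_append mask forcedL S

-- ---- index-concrete bridges (0 ≤ index ≤ 26: 27 decidable cases) ----
theorem pyRange_eq_idxsOf (index : Int) (h0 : 0 ≤ index) (h26 : index ≤ 26) :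
    PySem.List.pyRange index 26 1 = idxsOf index.toNat := by
  interval_cases index <;> decide

theorem forced_perm (index : Int) (h0 : 0 ≤ index) (h26 : index ≤ 26) :
    (FLs.filter (fun i => decide (index ≤ i))).Perm ((idxsOf index.toNat).filter (fun i => FLs.contains i)) := by
  interval_cases index <;> decide

theorem idxsOf_nodup (j : Nat) : (idxsOf j).Nodup := by
  have h : (List.range' j (26 - j)).Nodup := List.nodup_range' 1 (by norm_num)
  exact List.Nodup.map (fun a b hab => by exact_mod_cast hab) h

-- ---- B unfolding ----
theorem fold_nb (index : Int) :
    ∀ (L : List Int) (c0 m0 : Int),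
    L.foldl (fun (p : Int × Int) i =>
        if index ≤ i then (p.1 + 1, PySem.Int.bor p.2 ((1:Int) <<< i.toNat)) else p) (c0, m0) =
      (c0 + ((L.filter (fun i => decide (index ≤ i))).length : Int),
       orBits m0 (L.filter (fun i => decide (index ≤ i)))) := by
  intro L
  induction L with
  | nil => intro c0 m0; simp [orBits]
  | cons i L ih =>
    intro c0 m0
    simp only [List.foldl_cons, List.filter_cons]
    by_cases h : index ≤ i
    · rw [if_pos h, ih]
      simp only [h, decide_true, List.length_cons, if_true]
      rw [orBits_cons]
      simp only [Prod.mk.injEq, shift_nat_pow, shift_int_pow]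
      constructor
      · push_cast; ring
      · trivial
    · simp only [if_neg h, h, decide_false]
      exact ih c0 m0

theorem go_alt_eq (index k mask : Int) (words : List Int) :
    go_alt index k mask words =
      (if k < ((FLs.filter (fun i => decide (index ≤ i))).length : Int) then 0
       else Bcore words (orBits mask (FLs.filter (fun i => decide (index ≤ i))))
              ((PySem.List.pyRange index 26 1).filter (fun i => !FLs.contains i))
              (k - ((FLs.filter (fun i => decide (index ≤ i))).length : Int))) := by
  simp only [go_alt, Bcore, FLs]
  rw [fold_nb index]
  simp only [zero_add, shift_int_pow, shift_nat_pow]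
  rfl

-- ---- final assembly ----
theorem go_alt_nonneg_branch (index k mask : Int) (words : List Int) (hk : k < 0) :
    go_alt index k mask words = 0 := by
  rw [go_alt_eq]
  rw [if_pos (by
    have : (0:Int) ≤ ((FLs.filter (fun i => decide (index ≤ i))).length : Int) := by positivity
    omega)]

-- ===== VERDICT (by name: the statement is the Claim_ definition above) =====
theorem go_spec : Claim_equal_go := by
  intro index k mask words _ hPre
  unfold Spec_go
  by_cases hk : k < 0
  · rw [go_alt_nonneg_branch index k mask words hk]
    unfold go
    exact goF_neg _ _ _ _ _ hk
  · have hk0 : 0 ≤ k := by omega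
    rcases hPre with ⟨h0, h26⟩ | hneg
    swap
    · omega
    obtain ⟨j, rfl⟩ : ∃ j : Nat, index = (j : Int) := ⟨index.toNat, by omega⟩
    have hj26 : j ≤ 26 := by exact_mod_cast h26
    have hfuel : (27 - (j : Int)).toNat = 27 - j := by omega
    have hA : go (j : Int) k mask words = goL (idxsOf j) k mask words := by
      unfold go
      rw [hfuel]
      exact goF_eq_goL words (27 - j) j hj26 le_rfl k mask
    rw [hA, goL_eq_bestC words (idxsOf j) k mask, if_neg hk]
    rw [go_alt_eq]
    have htoNat : ((j : Int)).toNat = j := by omega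
    have hrange : PySem.List.pyRange (j : Int) 26 1 = idxsOf j := by
      have := pyRange_eq_idxsOf (j : Int) (by omega) h26
      rwa [htoNat] at this
    have hperm := forced_perm (j : Int) (by omega) h26
    rw [htoNat] at hperm
    have hlen : ((FLs.filter (fun i => decide ((j : Int) ≤ i))).length : Int)
        = (((idxsOf j).filter (fun i => FLs.contains i)).length : Int) := by
      rw [hperm.length_eq]
    have hbase : orBits mask (FLs.filter (fun i => decide ((j : Int) ≤ i)))
        = orBits mask ((idxsOf j).filter (fun i => FLs.contains i)) := orBits_perm mask hperm
    rw [hrange, hlen, hbase]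
    exact core words (idxsOf j) k mask (idxsOf_nodup j) hk0
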